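-- pv_equiv track=rewrite | github.com/gitfu/5xx | 5xx.py | mk_report_data
-- ===== SOURCE A (Python) =====
-- def mk_report_data(data_list):
--     '''
--     consolidate data by host_name for report
--     '''
--     report_data={}
--     for data in data_list:
--         for k,v in data['sites'].items():
--             if k not in report_data.keys():
--                 report_data[k]=v
--             else:
--                 report_data[k]['errors'] +=v['errors']
--                 report_data[k]['total'] +=v['total']
--     return report_data
-- ===== SOURCE B (Python) =====
-- def mk_report_data(data_list):
--     '''
--     consolidate data by host_name for report.
--     Group-then-reduce: first build an ordered index key -> list of value-dicts,
--     then fold each group's later dicts into its first dict (kept by reference,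
--     so the same in-place mutation of the inputs happens as in A).
--     '''
--     groups = {}
--     for data in data_list:
--         for k, v in data['sites'].items():
--             groups.setdefault(k, []).append(v)
--     report_data = {}
--     for k, vs in groups.items():
--         acc = vs[0]
--         for v in vs[1:]:
--             acc['errors'] += v['errors']
--             acc['total'] += v['total']
--         report_data[k] = acc
--     return report_data
-- ===== Notes on version B (the rewrite author's own statement) =====
-- stated objective: alternative
-- what changed: A consolidates in one incremental pass (insert the first value-dict, accumulate into it on every repeat); B is group-then-reduce: a first pass builds an ordered index from each key to the list of its value-dicts, a second pass reduces every group by folding the later dicts' errors/total into the group's first dict.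
import Mathlib
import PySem

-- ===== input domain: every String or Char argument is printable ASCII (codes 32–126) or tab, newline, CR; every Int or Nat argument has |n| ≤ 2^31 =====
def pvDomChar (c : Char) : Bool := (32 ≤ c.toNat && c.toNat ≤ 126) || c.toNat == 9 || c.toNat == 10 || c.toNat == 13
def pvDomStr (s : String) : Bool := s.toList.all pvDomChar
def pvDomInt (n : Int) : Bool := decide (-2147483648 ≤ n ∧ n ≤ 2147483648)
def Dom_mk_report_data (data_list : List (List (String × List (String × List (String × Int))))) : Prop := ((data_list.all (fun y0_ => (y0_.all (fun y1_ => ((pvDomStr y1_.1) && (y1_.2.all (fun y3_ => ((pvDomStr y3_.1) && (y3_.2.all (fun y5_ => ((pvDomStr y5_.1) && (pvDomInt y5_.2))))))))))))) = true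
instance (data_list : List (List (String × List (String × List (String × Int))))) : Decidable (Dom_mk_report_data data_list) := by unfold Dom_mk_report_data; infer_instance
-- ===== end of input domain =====

-- B replaces A's single incremental consolidation pass by a group-then-reduce scheme
-- (index each key's value-dicts first, then fold each group into its first dict);
-- same return value; both Pythons mutate the first-seen value-dicts in place (equivalence is about the return value).


-- ===== PORT A =====
-- data['sites']  (the KeyError case — key absent — is excluded by Pre_; getD's default is then never used)
def pvSites (data : List (String × List (String × List (String × Int)))) : List (String × List (String × Int)) :=
  (PySem.Dict.mk data).getD "sites" []

-- the two statements  d['errors'] += v['errors']; d['total'] += v['total']  (shared verbatim by both Pythons;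
-- the KeyError reads on absent 'errors'/'total' are excluded by Pre_, so getD's default 0 is never used)
def pvAddCounts (d v : List (String × Int)) : List (String × Int) :=
  let d1 := (PySem.Dict.mk d).insert "errors"
              ((PySem.Dict.mk d).getD "errors" 0 + (PySem.Dict.mk v).getD "errors" 0)
  (d1.insert "total" (d1.getD "total" 0 + (PySem.Dict.mk v).getD "total" 0)).items

-- A's loop body: if k not in report_data: report_data[k]=v else accumulate into report_data[k]
def pvStepA (rd : PySem.Dict String (List (String × Int))) (kv : String × List (String × Int)) :
    PySem.Dict String (List (String × Int)) :=
  if rd.contains kv.1 = false then rd.insert kv.1 kv.2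
  else rd.modify kv.1 [] (fun d => pvAddCounts d kv.2)

def mk_report_data (data_list : List (List (String × List (String × List (String × Int))))) : List (String × List (String × Int)) :=
  (data_list.foldl (fun rd data => (pvSites data).foldl pvStepA rd) PySem.Dict.empty).items

-- ===== PORT B =====
-- B's first pass: groups.setdefault(k, []).append(v)
def pvStepG (g : PySem.Dict String (List (List (String × Int)))) (kv : String × List (String × Int)) :
    PySem.Dict String (List (List (String × Int))) :=
  g.modify kv.1 [] (fun vs => vs ++ [kv.2])

-- B's second pass body: acc = vs[0]; for v in vs[1:]: accumulate into acc
-- (the [] branch is unreachable: groups only ever holds nonempty lists)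
def pvReduce (vs : List (List (String × Int))) : List (String × Int) :=
  match vs with
  | [] => []
  | first :: rest => rest.foldl pvAddCounts first

def mk_report_data_alt (data_list : List (List (String × List (String × List (String × Int))))) : List (String × List (String × Int)) :=
  ((data_list.foldl (fun g data => (pvSites data).foldl pvStepG g) PySem.Dict.empty).items.foldl
      (fun r (p : String × List (List (String × Int))) => r.insert p.1 (pvReduce p.2))
      PySem.Dict.empty).items

-- ===== PRECONDITION & SPEC =====
-- Pre_ excludes exactly (a) the inputs where Python A raises KeyError — an entry without a
-- "sites" key, or a site key occurring more than once whose value-dicts do not all carry both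
-- "errors" and "total" — and (b) association lists with duplicate keys at some dict level,
-- which do not encode any Python dict value at all.
def Pre_mk_report_data (data_list : List (List (String × List (String × List (String × Int))))) : Prop :=
  (∀ data ∈ data_list, (PySem.Dict.mk data).contains "sites" = true) ∧
  (∀ data ∈ data_list, (data.map (·.1)).Nodup ∧
     ∀ p ∈ data, (p.2.map (·.1)).Nodup ∧ ∀ q ∈ p.2, (q.2.map (·.1)).Nodup) ∧
  (∀ p ∈ data_list.flatMap pvSites,
     1 < (data_list.flatMap pvSites).countP (fun q => q.1 == p.1) →
     (PySem.Dict.mk p.2).contains "errors" = true ∧ (PySem.Dict.mk p.2).contains "total" = true)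
instance (data_list : List (List (String × List (String × List (String × Int))))) : Decidable (Pre_mk_report_data data_list) := by
  unfold Pre_mk_report_data; infer_instance

def pvWitness_mk_report_data : (List (List (String × List (String × List (String × Int))))) :=
  [[("sites", [("a", [("errors", 1), ("total", 2)])])],
   [("sites", [("a", [("errors", 3), ("total", 4)]), ("b", [("hits", 7)])])]]

def Spec_mk_report_data (data_list : List (List (String × List (String × List (String × Int))))) (out : List (String × List (String × Int))) : Prop := out = mk_report_data_alt data_list
instance (data_list : List (List (String × List (String × List (String × Int))))) (out : List (String × List (String × Int))) : Decidable (Spec_mk_report_data data_list out) := by unfold Spec_mk_report_data; infer_instance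

-- ===== CLAIM (what is proved, stated in full; the proofs are below) =====
def Claim_equal_mk_report_data : Prop := ∀ (data_list : List (List (String × List (String × List (String × Int))))), Dom_mk_report_data data_list → Pre_mk_report_data data_list → Spec_mk_report_data data_list (mk_report_data data_list)

-- ===== LEMMAS AND PROOFS =====

-- the map applied to the grouped index by B's second pass
def pvRedL (l : List (String × List (List (String × Int)))) : List (String × List (String × Int)) :=
  l.map (fun p => (p.1, pvReduce p.2))

-- a nested  for data: for kv in sites(data)  loop is the fold over the flattened item list
theorem pv_foldl_sites_flat {β : Type} (step : β → (String × List (String × Int)) → β)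
    (dl : List (List (String × List (String × List (String × Int))))) (a : β) :
    dl.foldl (fun acc data => (pvSites data).foldl step acc) a
      = (dl.flatMap pvSites).foldl step a := by
  induction dl generalizing a with
  | nil => rfl
  | cons d t ih => simp [List.flatMap_cons, List.foldl_append, ih]

theorem pv_reduce_append (vs : List (List (String × Int))) (v : List (String × Int)) (h : vs ≠ []) :
    pvReduce (vs ++ [v]) = pvAddCounts (pvReduce vs) v := by
  cases vs with
  | nil => exact absurd rfl h
  | cons a rest => simp [pvReduce, List.foldl_append]

theorem pv_contains_redL (l : List (String × List (List (String × Int)))) (k : String) :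
    (PySem.Dict.mk (pvRedL l)).contains k = (PySem.Dict.mk l).contains k := by
  simp [PySem.Dict.contains, pvRedL, List.any_map, Function.comp_def]

theorem pv_get?_redL (l : List (String × List (List (String × Int)))) (k : String) :
    (PySem.Dict.mk (pvRedL l)).get? k = ((PySem.Dict.mk l).get? k).map pvReduce := by
  simp [PySem.Dict.get?, pvRedL, List.find?_map, Function.comp_def, Option.map_map]

-- one item of the flattened list: A's step on the reduced dict = reduce after B's grouping step
theorem pv_step_comm (g : PySem.Dict String (List (List (String × Int))))
    (kv : String × List (String × Int)) (hne : ∀ p ∈ g.items, p.2 ≠ []) :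
    pvStepA (PySem.Dict.mk (pvRedL g.items)) kv = PySem.Dict.mk (pvRedL (pvStepG g kv).items) := by
  obtain ⟨k, v⟩ := kv
  have hc := pv_contains_redL g.items k
  by_cases h : g.contains k = true
  · -- key already present: both sides rewrite the k-entries
    obtain ⟨vs0, hfind⟩ : ∃ vs0, g.get? k = some vs0 := by
      rcases hg : g.get? k with _ | vs0
      · rw [PySem.Dict.contains_eq_isSome_get?, hg] at h; simp at h
      · exact ⟨vs0, rfl⟩
    have hvs0ne : vs0 ≠ [] := by
      have hmem : (k, vs0) ∈ g.items := PySem.Dict.mem_items_of_get?_eq_some _ hfind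
      exact hne _ hmem
    have hcr : (PySem.Dict.mk (pvRedL g.items)).contains k = true := by
      rw [hc]; exact h
    have hgd : (PySem.Dict.mk (pvRedL g.items)).getD k [] = pvReduce vs0 := by
      simp [PySem.Dict.getD, pv_get?_redL, hfind]
    have hgdg : g.getD k [] = vs0 := by simp [PySem.Dict.getD, hfind]
    apply PySem.Dict.ext
    simp only [pvStepA, pvStepG, PySem.Dict.modify, hcr, Bool.true_eq_false, if_false,
      PySem.Dict.items_insert_of_contains _ _ hcr,
      PySem.Dict.items_insert_of_contains _ _ h, hgd, hgdg]
    show (pvRedL g.items).map _ = pvRedL (g.items.map _)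
    simp only [pvRedL, List.map_map]
    apply List.map_congr_left
    intro p hp
    by_cases hpk : (p.1 == k) = true
    · simp [Function.comp, hpk, pv_reduce_append vs0 v hvs0ne]
    · simp [Function.comp, hpk]
  · -- fresh key: both sides append
    have h' : g.contains k = false := by simpa using h
    have hcr : (PySem.Dict.mk (pvRedL g.items)).contains k = false := by rw [hc]; exact h'
    have hgdg : g.getD k [] = [] := PySem.Dict.getD_of_not_contains _ _ h'
    apply PySem.Dict.ext
    simp only [pvStepA, pvStepG, PySem.Dict.modify, hcr, if_true,
      PySem.Dict.items_insert_of_not_contains _ _ hcr,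
      PySem.Dict.items_insert_of_not_contains _ _ h', hgdg]
    simp [pvRedL, pvReduce]

theorem pv_stepG_keeps_nonempty (g : PySem.Dict String (List (List (String × Int))))
    (kv : String × List (String × Int)) (hne : ∀ p ∈ g.items, p.2 ≠ []) :
    ∀ p ∈ (pvStepG g kv).items, p.2 ≠ [] := by
  intro p hp
  simp only [pvStepG, PySem.Dict.modify] at hp
  rcases (PySem.Dict.mem_items_insert _ _ _ _).1 hp with h | ⟨h, _⟩
  · subst h; simp
  · exact hne _ h

-- the main invariant: running A's step over any item list = reducing after B's grouping step
theorem pv_main (l : List (String × List (String × Int)))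
    (g : PySem.Dict String (List (List (String × Int)))) (hne : ∀ p ∈ g.items, p.2 ≠ []) :
    l.foldl pvStepA (PySem.Dict.mk (pvRedL g.items))
      = PySem.Dict.mk (pvRedL (l.foldl pvStepG g).items) := by
  induction l generalizing g with
  | nil => rfl
  | cons kv t ih =>
      simp only [List.foldl_cons, pv_step_comm g kv hne]
      exact ih _ (pv_stepG_keeps_nonempty g kv hne)

-- ===== VERDICT (by name: the statement is the Claim_ definition above) =====
theorem mk_report_data_spec : Claim_equal_mk_report_data := by
  intro dl _ _
  show mk_report_data dl = mk_report_data_alt dl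
  unfold mk_report_data mk_report_data_alt
  rw [pv_foldl_sites_flat pvStepA, pv_foldl_sites_flat pvStepG]
  have hnd : (List.map (fun (p : String × List (List (String × Int))) => p.1)
      ((dl.flatMap pvSites).foldl pvStepG PySem.Dict.empty).items).Nodup :=
    PySem.Dict.nodup_keys_foldl_modify_key (dl.flatMap pvSites) (fun kv => kv.1) []
      (fun _ kv => (fun vs => vs ++ [kv.2])) PySem.Dict.empty List.nodup_nil
  rw [PySem.Dict.items_foldl_insert_fresh
        ((dl.flatMap pvSites).foldl pvStepG PySem.Dict.empty).items
        (fun p => p.1) (fun p => pvReduce p.2) PySem.Dict.empty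
        (fun a _ => rfl) hnd]
  have hA := pv_main (dl.flatMap pvSites) PySem.Dict.empty (by intro p hp; simp [PySem.Dict.empty] at hp)
  exact (congrArg PySem.Dict.items hA).trans (by simp [pvRedL, PySem.Dict.empty])
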